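-- pv_equiv track=rewrite | github.com/smiles21/narcissistic-numbers | digit_functions.py | get_adjacent_digits
-- ===== SOURCE A (Python) =====
-- def get_adjacent_digits(n, tuple_length):
--   """
--   Returns a list of numbers where each numbre is the tuple_length
--   group of adjacent digits
--
--   Ex: get_adjacent_digits(2345, 2) => [23, 34, 45]
--   Ex: get_adjacent_digits(2345, 1) => [1, 2, 3, 4]
--   """
--   result = []
--   limit = (10 ** (tuple_length - 1)) - 1
--   divisor = int(10 ** tuple_length)
--   while n > limit:
--     remainder = n % divisor
--     result.insert(0, remainder)
--     n //= 10
--   return result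
-- ===== SOURCE B (Python) =====
-- def get_adjacent_digits(n, tuple_length):
--   """Index-based re-implementation: count the digits once, then read each
--   tuple_length-digit window directly as (n // 10**e) % 10**tuple_length."""
--   p = 10 ** (tuple_length - 1)
--   if n < p:
--     return []
--   d = 0
--   m = n
--   while m > 0:
--     m //= 10
--     d += 1
--   div = 10 * p
--   return [(n // 10 ** e) % div for e in range(d - tuple_length, -1, -1)]
-- ===== Notes on version B (the rewrite author's own statement) =====
-- stated objective: alternative
-- what changed: A peels digits with a destructive while-loop (n %= , n //= 10) that prepends each window; B counts the digits once and then emits each window directly by the closed-form index expression (n // 10**e) % 10**tuple_length over a descending range.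
import Mathlib
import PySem

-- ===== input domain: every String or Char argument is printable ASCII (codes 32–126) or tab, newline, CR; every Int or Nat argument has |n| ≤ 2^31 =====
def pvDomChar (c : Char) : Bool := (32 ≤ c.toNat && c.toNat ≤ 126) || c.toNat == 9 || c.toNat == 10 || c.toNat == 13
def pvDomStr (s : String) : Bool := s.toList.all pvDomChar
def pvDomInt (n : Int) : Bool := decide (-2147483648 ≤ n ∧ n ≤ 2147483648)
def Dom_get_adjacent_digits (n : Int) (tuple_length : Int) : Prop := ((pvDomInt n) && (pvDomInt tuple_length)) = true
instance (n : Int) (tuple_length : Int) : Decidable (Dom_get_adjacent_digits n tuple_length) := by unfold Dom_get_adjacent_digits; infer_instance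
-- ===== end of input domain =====

-- B replaces A's peel-and-prepend while-loop by a digit count plus a direct
-- index formula (n // 10**e) % 10**tuple_length over a descending range (objective: alternative).

-- ===== PORT A =====
-- the while-loop of A; fuel only makes the recursion total, one unit is spent per iteration
def pvLoopA (fuel : Nat) (limit divisor : Int) (n : Int) (result : List Int) : List Int :=
  match fuel with
  | 0 => result
  | fuel + 1 =>
    if n > limit then
      pvLoopA fuel limit divisor (PySem.Int.floordiv n 10) (PySem.Int.mod n divisor :: result)
    else result

def get_adjacent_digits (n : Int) (tuple_length : Int) : List Int :=
  let limit : Int := 10 ^ (tuple_length - 1).toNat - 1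
  let divisor : Int := 10 ^ tuple_length.toNat
  pvLoopA (n.toNat + 1) limit divisor n []

-- ===== PORT B =====
-- B's digit-count loop (while m > 0: m //= 10; d += 1)
def pvDigitCount (m : Int) : Nat :=
  if h : 0 < m then pvDigitCount (PySem.Int.floordiv m 10) + 1 else 0
termination_by m.toNat
decreasing_by
  have h10 : PySem.Int.floordiv m 10 = m / 10 := PySem.Int.floordiv_eq_ediv_of_pos (by omega)
  rw [h10]; omega

def get_adjacent_digits_alt (n : Int) (tuple_length : Int) : List Int :=
  let p : Int := 10 ^ (tuple_length - 1).toNat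
  if n < p then []
  else
    let d := pvDigitCount n
    let div := 10 * p
    (PySem.List.pyRange ((d : Int) - tuple_length) (-1) (-1)).map
      (fun e => PySem.Int.mod (PySem.Int.floordiv n (10 ^ e.toNat)) div)

-- ===== PRECONDITION & SPEC =====
-- Pre_ excludes tuple_length ≤ 0 with n ≥ 0, exactly where A raises or diverges:
-- there limit = 10**(tuple_length-1) is a float below n, so the loop divides by int(10**tuple_length) = 0
-- (ZeroDivisionError) for tuple_length < 0 or never lowers n past the float limit (infinite loop) for tuple_length = 0.
def Pre_get_adjacent_digits (n : Int) (tuple_length : Int) : Prop := 1 ≤ tuple_length ∨ n < 0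
instance (n : Int) (tuple_length : Int) : Decidable (Pre_get_adjacent_digits n tuple_length) := by
  unfold Pre_get_adjacent_digits; infer_instance

def pvWitness_get_adjacent_digits : Int × Int := (2345, 2)

def Spec_get_adjacent_digits (n : Int) (tuple_length : Int) (out : List Int) : Prop := out = get_adjacent_digits_alt n tuple_length
instance (n : Int) (tuple_length : Int) (out : List Int) : Decidable (Spec_get_adjacent_digits n tuple_length out) := by unfold Spec_get_adjacent_digits; infer_instance

-- ===== CLAIM (what is proved, stated in full; the proofs are below) =====
def Claim_equal_get_adjacent_digits : Prop := ∀ (n : Int) (tuple_length : Int), Dom_get_adjacent_digits n tuple_length → Pre_get_adjacent_digits n tuple_length → Spec_get_adjacent_digits n tuple_length (get_adjacent_digits n tuple_length)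

-- ===== LEMMAS AND PROOFS =====

-- the common shape: windows of n for window width k+1 (divisor 10 * 10^k, threshold 10^k)
def pvWin (k : Nat) (n : Int) : List Int :=
  if n < 10 ^ k then []
  else
    (PySem.List.pyRange ((pvDigitCount n : Int) - ((k : Int) + 1)) (-1) (-1)).map
      (fun e => PySem.Int.mod (PySem.Int.floordiv n (10 ^ e.toNat)) (10 * 10 ^ k))

lemma pvDigitCount_le {m : Int} {d : Nat} (hm : 0 ≤ m) (h : m < 10 ^ d) : pvDigitCount m ≤ d := by
  induction d generalizing m with
  | zero =>
    rw [pvDigitCount]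
    have : ¬ 0 < m := by simp only [pow_zero] at h; omega
    simp [this]
  | succ d ih =>
    rw [pvDigitCount]
    by_cases h0 : 0 < m
    · simp only [h0, dif_pos]
      have hq : PySem.Int.floordiv m 10 = m / 10 := PySem.Int.floordiv_eq_ediv_of_pos (by omega)
      have h1 : m / 10 < 10 ^ d := by
        rw [Int.ediv_lt_iff_lt_mul (by omega : (0:Int) < 10)]
        calc m < 10 ^ (d + 1) := h
          _ = 10 ^ d * 10 := by ring
      have := ih (m := m / 10) (Int.ediv_nonneg hm (by omega)) h1
      rw [hq]; omega
    · simp [h0]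

lemma pvDigitCount_gt {m : Int} {d : Nat} (h : (10:Int) ^ d ≤ m) : d < pvDigitCount m := by
  induction d generalizing m with
  | zero =>
    have h0 : 0 < m := by have : (0:Int) < 10 ^ 0 := by norm_num
                          omega
    rw [pvDigitCount]; simp [h0]
  | succ d ih =>
    have h0 : 0 < m := lt_of_lt_of_le (pow_pos (by omega) _) h
    rw [pvDigitCount]; simp only [h0, dif_pos]
    have hq : PySem.Int.floordiv m 10 = m / 10 := PySem.Int.floordiv_eq_ediv_of_pos (by omega)
    have h1 : (10:Int) ^ d ≤ m / 10 := by
      rw [Int.le_ediv_iff_mul_le (by omega : (0:Int) < 10)]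
      calc (10:Int) ^ d * 10 = 10 ^ (d + 1) := by ring
        _ ≤ m := h
    have := ih (m := m / 10) h1
    rw [hq]; omega

lemma pvDesc_succ (c : Nat) :
    PySem.List.pyRange ((c : Int) + 1) (-1) (-1) =
      ((PySem.List.pyRange (c : Int) (-1) (-1)).map (· + 1)) ++ [0] := by
  rw [PySem.List.pyRange_neg_one, PySem.List.pyRange_neg_one]
  have h1 : ((c : Int) + 1 - -1).toNat = (c + 1) + 1 := by omega
  have h2 : ((c : Int) - -1).toNat = c + 1 := by omega
  rw [h1, h2, List.range_succ, List.map_append, List.map_map]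
  congr 1
  · refine List.map_congr_left (fun k _ => ?_)
    simp only [Function.comp_apply]
    ring
  · simp

lemma pvWin_step {k : Nat} {n : Int} (h : (10:Int) ^ k ≤ n) :
    pvWin k n = pvWin k (PySem.Int.floordiv n 10) ++ [PySem.Int.mod n (10 * 10 ^ k)] := by
  have hn0 : 0 < n := lt_of_lt_of_le (pow_pos (by omega) _) h
  have hq : PySem.Int.floordiv n 10 = n / 10 := PySem.Int.floordiv_eq_ediv_of_pos (by omega)
  have hqnn : 0 ≤ n / 10 := Int.ediv_nonneg (by omega) (by omega)
  have hcnt : pvDigitCount n = pvDigitCount (PySem.Int.floordiv n 10) + 1 := by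
    rw [pvDigitCount]; simp [hn0]
  have hk1 : k < pvDigitCount n := pvDigitCount_gt h
  rw [pvWin, pvWin, if_neg (by omega), hcnt]
  push_cast
  set d' := pvDigitCount (PySem.Int.floordiv n 10) with hd'
  by_cases hsm : PySem.Int.floordiv n 10 < 10 ^ k
  · -- last window: d' = k, range is [0]
    have hle : d' ≤ k := pvDigitCount_le (hq ▸ hqnn) hsm
    have hdk : d' = k := by omega
    have hrange : ((d' : Int) + 1) - ((k : Int) + 1) = 0 := by rw [hdk]; ring
    rw [if_pos hsm, hrange]
    rw [PySem.List.pyRange_neg_one_cons (by omega), PySem.List.pyRange_neg_one_eq_nil (by omega)]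
    simp
  · -- inner step
    have hge : (10:Int) ^ k ≤ PySem.Int.floordiv n 10 := by omega
    have hk2 : k < d' := pvDigitCount_gt hge
    have hb : ((d' : Int) + 1) - ((k : Int) + 1) = ((d' - (k+1) : Nat) : Int) + 1 := by
      push_cast [Nat.cast_sub (by omega : k + 1 ≤ d')]; ring
    have hb2 : ((d' : Int)) - ((k : Int) + 1) = ((d' - (k+1) : Nat) : Int) := by
      push_cast [Nat.cast_sub (by omega : k + 1 ≤ d')]; ring
    rw [if_neg hsm, hb, hb2, pvDesc_succ, List.map_append, List.map_map]
    congr 1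
    · apply List.map_congr_left
      intro e he
      have he0 : 0 ≤ e := by
        have := (PySem.List.mem_pyRange_neg_one.mp he).1
        omega
      simp only [Function.comp]
      have het : (e + 1).toNat = e.toNat + 1 := by omega
      have hpow : (10:Int) ^ (e + 1).toNat = 10 ^ e.toNat * 10 := by rw [het]; ring
      have hdd : PySem.Int.floordiv n (10 ^ (e + 1).toNat)
          = PySem.Int.floordiv (PySem.Int.floordiv n 10) (10 ^ e.toNat) := by
        rw [hq, PySem.Int.floordiv_eq_ediv_of_pos (by positivity),
            PySem.Int.floordiv_eq_ediv_of_pos (by positivity), hpow,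
            Int.ediv_ediv_of_nonneg (by omega : (0:Int) ≤ 10), mul_comm]
      rw [hdd]
    · simp

lemma pvLoopA_eq_pvWin (k : Nat) : ∀ (fuel : Nat) (n : Int), 0 ≤ n → n.toNat < fuel → ∀ acc,
    pvLoopA fuel (10 ^ k - 1) (10 * 10 ^ k) n acc = pvWin k n ++ acc := by
  intro fuel
  induction fuel with
  | zero => intro n hn hf; omega
  | succ fuel ih =>
    intro n hn hf acc
    have hp : (0:Int) < 10 ^ k := pow_pos (by omega) _
    rw [pvLoopA]
    by_cases hgt : n > 10 ^ k - 1
    · have hge : (10:Int) ^ k ≤ n := by omega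
      have hn0 : 0 < n := by omega
      have hq : PySem.Int.floordiv n 10 = n / 10 := PySem.Int.floordiv_eq_ediv_of_pos (by omega)
      rw [if_pos hgt, ih (PySem.Int.floordiv n 10) (hq ▸ Int.ediv_nonneg (by omega) (by omega))
          (by rw [hq]; omega), pvWin_step hge]
      simp
    · rw [if_neg hgt, pvWin, if_pos (by omega)]
      simp

-- ===== VERDICT (by name: the statement is the Claim_ definition above) =====
theorem get_adjacent_digits_spec : Claim_equal_get_adjacent_digits := by
  intro n t _ hpre
  unfold Spec_get_adjacent_digits
  by_cases hn : n < 0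
  · -- n negative: A's loop never runs, B's guard fires
    have hp : (0:Int) < 10 ^ (t - 1).toNat := pow_pos (by omega) _
    have hz : n.toNat = 0 := by omega
    simp only [get_adjacent_digits, get_adjacent_digits_alt, hz]
    rw [pvLoopA, if_neg (by omega), if_pos (by omega)]
  · -- n ≥ 0, hence 1 ≤ t by Pre_
    have ht : 1 ≤ t := by
      rcases hpre with h | h
      · exact h
      · omega
    set k := (t - 1).toNat with hk
    have hkt : (k : Int) = t - 1 := Int.toNat_of_nonneg (by omega)
    have htn : t.toNat = k + 1 := by omega
    have hdiv : (10:Int) ^ t.toNat = 10 * 10 ^ k := by rw [htn]; ring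
    have hA : get_adjacent_digits n t = pvWin k n := by
      simp only [get_adjacent_digits, hdiv, ← hk]
      rw [pvLoopA_eq_pvWin k (n.toNat + 1) n (by omega) (by omega)]
      simp
    have hB : get_adjacent_digits_alt n t = pvWin k n := by
      simp only [get_adjacent_digits_alt, pvWin, ← hk]
      have : ((pvDigitCount n : Int)) - t = (pvDigitCount n : Int) - ((k : Int) + 1) := by omega
      rw [this]
    rw [hA, hB]
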